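-- pv_equiv track=rewrite | github.com/shreyanshdas00/Direct_Contact_Intent_Detection | utils/predict_process.py | nested_list
-- ===== SOURCE A (Python) =====
-- def nested_list(items, seq_lens):
--     num_items = len(items)
--     trans_items = [[] for _ in range(0, num_items)]
--
--     count = 0
--     for jdx in range(0, len(seq_lens)):
--         for idx in range(0, num_items):
--             trans_items[idx].append(items[idx][count:count + seq_lens[jdx]])
--         count += seq_lens[jdx]
--
--     return trans_items
-- ===== SOURCE B (Python) =====
-- def nested_list(items, seq_lens):
--     total = sum(seq_lens)
--     out = []
--     for seq in items:
--         end = total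
--         row = []
--         for l in reversed(seq_lens):
--             row.append(seq[end - l:end])
--             end -= l
--         row.reverse()
--         out.append(row)
--     return out
-- ===== Notes on version B (the rewrite author's own statement) =====
-- stated objective: alternative
-- what changed: B iterates items in the outer loop and carves each item's chunks back-to-front: it walks seq_lens in reverse from the total sum, slicing each chunk off the current end and finally reversing the row, instead of A's lens-outer forward pass that keeps a running start counter and appends to every item's row.
import Mathlib
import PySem

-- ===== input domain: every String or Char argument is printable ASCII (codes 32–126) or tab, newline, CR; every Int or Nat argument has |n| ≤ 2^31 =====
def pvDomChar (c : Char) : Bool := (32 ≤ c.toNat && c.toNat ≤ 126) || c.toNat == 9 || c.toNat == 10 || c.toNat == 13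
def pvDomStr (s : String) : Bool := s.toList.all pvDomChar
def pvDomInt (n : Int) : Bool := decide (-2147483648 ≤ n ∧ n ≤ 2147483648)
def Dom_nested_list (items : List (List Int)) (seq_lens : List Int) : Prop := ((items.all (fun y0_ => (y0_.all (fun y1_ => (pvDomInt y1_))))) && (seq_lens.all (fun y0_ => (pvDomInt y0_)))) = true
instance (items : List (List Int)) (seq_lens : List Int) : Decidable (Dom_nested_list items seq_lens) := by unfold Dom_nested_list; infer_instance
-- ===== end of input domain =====

-- B flips the nesting (items outer) and builds each row back-to-front: it walks seq_lens
-- reversed from the total sum, carving each chunk off the current end, then reverses the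
-- row — a different decomposition of the same task, same cost as A.


-- ===== PORT A =====
-- inner loop: for idx in range(num): trans_items[idx].append(items[idx][count:count+L])
-- (structural recursion over trans_items and items in step, same values appended)
def pvAppendRow : List (List (List Int)) → List (List Int) → Int → Int → List (List (List Int))
  | [], _, _, _ => []
  | _ :: _, [], _, _ => []
  | t :: ts, seq :: rest, c, L =>
      (t ++ [PySem.List.slice seq (some c) (some (c + L))]) :: pvAppendRow ts rest c L

-- outer loop: for jdx over seq_lens, carrying count
def pvLoopA (items : List (List Int)) : List Int → Int → List (List (List Int)) → List (List (List Int))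
  | [], _, tr => tr
  | l :: ls, count, tr => pvLoopA items ls (count + l) (pvAppendRow tr items count l)

def nested_list (items : List (List Int)) (seq_lens : List Int) : List (List (List Int)) :=
  pvLoopA items seq_lens 0 (items.map (fun _ => []))

-- ===== PORT B =====
-- inner loop of Source B: for l in reversed(seq_lens): row.append(seq[end-l:end]); end -= l
def pvCarve (seq : List Int) : List Int → Int → List (List Int) → List (List Int) × Int
  | [], e, row => (row, e)
  | l :: ls, e, row => pvCarve seq ls (e - l) (row ++ [PySem.List.slice seq (some (e - l)) (some e)])

def nested_list_alt (items : List (List Int)) (seq_lens : List Int) : List (List (List Int)) :=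
  let total := seq_lens.foldl (· + ·) 0
  items.map (fun seq => (pvCarve seq seq_lens.reverse total []).1.reverse)

-- ===== PRECONDITION & SPEC =====
def Spec_nested_list (items : List (List Int)) (seq_lens : List Int) (out : List (List (List Int))) : Prop := out = nested_list_alt items seq_lens
instance (items : List (List Int)) (seq_lens : List Int) (out : List (List (List Int))) : Decidable (Spec_nested_list items seq_lens out) := by unfold Spec_nested_list; infer_instance

-- ===== CLAIM (what is proved, stated in full; the proofs are below) =====
def Claim_equal_nested_list : Prop := ∀ (items : List (List Int)) (seq_lens : List Int), Dom_nested_list items seq_lens → Spec_nested_list items seq_lens (nested_list items seq_lens)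

-- ===== LEMMAS AND PROOFS =====

-- reference boundary list, recursive form: the chunk of length l starting at c
def pvBoundsAux (c : Int) : List Int → List (Int × Int)
  | [] => []
  | l :: ls => (c, c + l) :: pvBoundsAux (c + l) ls

def pvSum : List Int → Int
  | [] => 0
  | l :: ls => l + pvSum ls

theorem pvSum_foldl (ls : List Int) : ∀ c : Int, ls.foldl (· + ·) c = c + pvSum ls := by
  induction ls with
  | nil => intro c; simp [pvSum]
  | cons l ls ih => intro c; simp [List.foldl, ih, pvSum]; ring

-- A-side characterisation -------------------------------------------------

theorem pvAppendRow_eq (c L : Int) : ∀ (ts : List (List (List Int))) (its : List (List Int)),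
    pvAppendRow ts its c L
      = List.zipWith (fun t seq => t ++ [PySem.List.slice seq (some c) (some (c + L))]) ts its := by
  intro ts
  induction ts with
  | nil => intro its; cases its <;> simp [pvAppendRow]
  | cons t ts ih => intro its; cases its <;> simp [pvAppendRow, ih]

theorem zipWith_zipWith {α β γ δ : Type} (f : γ → β → δ) (g : α → β → γ) :
    ∀ (ts : List α) (its : List β),
      List.zipWith f (List.zipWith g ts its) its = List.zipWith (fun t s => f (g t s) s) ts its := by
  intro ts
  induction ts with
  | nil => intro its; simp
  | cons t ts ih => intro its; cases its <;> simp [ih]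

theorem pvLoopA_eq (items : List (List Int)) : ∀ (ls : List Int) (c : Int) (ts : List (List (List Int))),
    ts.length = items.length →
    pvLoopA items ls c ts
      = List.zipWith (fun t seq =>
          t ++ (pvBoundsAux c ls).map (fun p => PySem.List.slice seq (some p.1) (some p.2))) ts items := by
  intro ls
  induction ls with
  | nil =>
      intro c ts h
      simp only [pvLoopA, pvBoundsAux, List.map_nil, List.append_nil]
      induction ts generalizing items with
      | nil => simp
      | cons t ts ih =>
          cases items with
          | nil => simp at h
          | cons hd tl =>
              simp only [List.zipWith]
              exact congrArg (List.cons t) (ih tl (by simpa using h))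
  | cons l ls ih =>
      intro c ts h
      have hlen : (pvAppendRow ts items c l).length = items.length := by
        rw [pvAppendRow_eq, List.length_zipWith, h, Nat.min_self]
      show pvLoopA items ls (c + l) (pvAppendRow ts items c l)
        = List.zipWith (fun t seq =>
            t ++ (pvBoundsAux c (l :: ls)).map (fun p => PySem.List.slice seq (some p.1) (some p.2))) ts items
      rw [ih (c + l) _ hlen, pvAppendRow_eq, zipWith_zipWith]
      simp [pvBoundsAux, List.append_assoc]

theorem zipWith_map_nil {β γ : Type} (f : List γ → β → List γ) :
    ∀ (its : List β), List.zipWith f (its.map (fun _ => ([] : List γ))) its = its.map (fun s => f [] s) := by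
  intro its
  induction its with
  | nil => simp
  | cons s its ih => simp only [List.map, List.zipWith]; rw [ih]

-- B-side characterisation: carving backwards from c + sum produces the reversed chunk list

theorem pvCarve_eq (seq : List Int) : ∀ (ls : List Int) (c : Int) (row : List (List Int)),
    pvCarve seq ls.reverse (c + pvSum ls) row
      = (row ++ ((pvBoundsAux c ls).map
          (fun p => PySem.List.slice seq (some p.1) (some p.2))).reverse, c) := by
  intro ls
  induction ls with
  | nil => intro c row; simp [pvSum, pvCarve, pvBoundsAux]
  | cons l ls ih =>
      intro c row
      have hrev : (l :: ls).reverse = ls.reverse ++ [l] := by simp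
      have hfold : ∀ (xs ys : List Int) (e : Int) (r : List (List Int)),
          pvCarve seq (xs ++ ys) e r
            = pvCarve seq ys (pvCarve seq xs e r).2 (pvCarve seq xs e r).1 := by
        intro xs
        induction xs with
        | nil => intro ys e r; simp [pvCarve]
        | cons x xs ihx => intro ys e r; simp [pvCarve, ihx]
      have hsum : c + pvSum (l :: ls) = (c + l) + pvSum ls := by simp [pvSum]; ring
      rw [hrev, hfold, hsum, ih (c + l) row]
      simp [pvCarve, pvBoundsAux, List.append_assoc]

-- ===== VERDICT (by name: the statement is the Claim_ definition above) =====
theorem nested_list_spec : Claim_equal_nested_list := by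
  intro items seq_lens _
  unfold Spec_nested_list nested_list nested_list_alt
  rw [pvLoopA_eq items seq_lens 0 _ (by simp), zipWith_map_nil]
  apply List.map_congr_left
  intro seq _
  have h := pvCarve_eq seq seq_lens 0 []
  simp only [zero_add] at h
  rw [pvSum_foldl, zero_add, h]
  simp
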